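-- pv_equiv track=rewrite | github.com/jhryniw/adventofcode | 2023/day25.py | extract_flow_group
-- ===== SOURCE A (Python) =====
-- def extract_flow_group(flows: dict, conns: dict, start: str):
--     group = set()
--     q = [start]
--     while q:
--         cur = q.pop()
--         group.add(cur)
--         for c in conns[cur]:
--             if c not in group and flows[(cur, c)] > 0:
--                 q.append(c)
--     return group
-- ===== SOURCE B (Python) =====
-- def extract_flow_group(flows: dict, conns: dict, start: str):
--     # Recursive DFS on the call stack instead of an explicit worklist.
--     # Neighbors are visited in reverse order, which is exactly the order the
--     # LIFO stack of the iterative version pops them in.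
--     group = set()
--
--     def dfs(cur):
--         group.add(cur)
--         for c in reversed(conns[cur]):
--             if c not in group and flows[(cur, c)] > 0:
--                 dfs(c)
--
--     dfs(start)
--     return group
-- ===== Notes on version B (the rewrite author's own statement) =====
-- stated objective: alternative
-- what changed: Replaces the explicit LIFO worklist (eligibility checked at push time, nodes re-popped and re-scanned when stale) by a recursive DFS on the call stack that checks eligibility at call time and visits each node's neighbors in reverse order, which provably yields the same group in the same insertion order.
-- outside the precondition, e.g. on extract_flow_group({('a', 'b'): 1}, {'a': ['b'], 'b': ['a']}, 'a'): A returns {'a', 'b'}, B returns {'a', 'b'}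
import Mathlib
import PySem

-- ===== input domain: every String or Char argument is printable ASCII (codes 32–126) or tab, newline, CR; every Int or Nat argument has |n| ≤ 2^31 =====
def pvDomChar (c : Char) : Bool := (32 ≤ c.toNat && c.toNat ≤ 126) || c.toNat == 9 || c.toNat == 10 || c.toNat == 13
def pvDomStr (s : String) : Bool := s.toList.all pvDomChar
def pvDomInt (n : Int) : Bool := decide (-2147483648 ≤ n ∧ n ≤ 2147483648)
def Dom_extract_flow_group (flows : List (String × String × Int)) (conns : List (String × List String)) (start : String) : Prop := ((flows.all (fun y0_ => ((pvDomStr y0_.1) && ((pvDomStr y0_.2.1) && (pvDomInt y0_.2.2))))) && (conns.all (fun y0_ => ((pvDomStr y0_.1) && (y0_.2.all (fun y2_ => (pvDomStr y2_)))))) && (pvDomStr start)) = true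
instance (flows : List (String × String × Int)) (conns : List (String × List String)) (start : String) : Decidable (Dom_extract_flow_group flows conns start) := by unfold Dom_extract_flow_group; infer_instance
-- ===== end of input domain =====

-- B replaces A's explicit LIFO worklist (eligibility checked at push time, stale
-- entries re-popped) by a recursive DFS that checks eligibility at call time and
-- visits neighbors in reverse order; the group and its insertion order coincide.

-- shared dictionary-lookup helpers (both Pythons evaluate conns[cur] / flows[(cur, c)];
-- total via a default, which Pre_ makes unreachable)
def pvConnsGet (conns : List (String × List String)) (k : String) : List String :=
  PySem.Dict.getD (PySem.Dict.mk conns) k []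

def pvFlowsGet (flows : List (String × String × Int)) (u c : String) : Int :=
  PySem.Dict.getD (PySem.Dict.mk (flows.map (fun t => ((t.1, t.2.1), t.2.2)))) (u, c) 0

-- the common eligibility test 'c not in group and flows[(cur, c)] > 0'
def pvElig (flows : List (String × String × Int)) (g : PySem.Set String) (cur c : String) : Bool :=
  !(PySem.Set.contains g c) && decide (0 < pvFlowsGet flows cur c)

-- all strings that can ever be pushed/recursed into (the conns values)
def pvCV (conns : List (String × List String)) : List String := conns.flatMap (fun p => p.2)

def pvMaxDeg (conns : List (String × List String)) : Nat :=
  (conns.map (fun p => p.2.length)).foldr Nat.max 0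

-- fuel for A's while-loop: strictly larger than the potential of the initial state
-- (proved sufficient below; the loop is a faithful transliteration on every input)
def pvFuelA (conns : List (String × List String)) : Nat :=
  (2 * pvMaxDeg conns + 2) * ((pvCV conns).length + 2) + pvMaxDeg conns + 2

-- ===== PORT A =====
-- while q: cur = q.pop(); group.add(cur); for c in conns[cur]: if elig: q.append(c)
-- (the Python list used LIFO is represented head-as-top; appends of one scan cons in order)
def pvLoopA (flows : List (String × String × Int)) (conns : List (String × List String)) :
    Nat → PySem.Set String → List String → PySem.Set String
  | 0, group, _ => group
  | _ + 1, group, [] => group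
  | f + 1, group, cur :: rest =>
    let group1 := PySem.Set.add group cur
    let q1 := (pvConnsGet conns cur).foldl
      (fun q c => if pvElig flows group1 cur c then c :: q else q) rest
    pvLoopA flows conns f group1 q1

def extract_flow_group (flows : List (String × String × Int)) (conns : List (String × List String)) (start : String) : List String :=
  pvLoopA flows conns (pvFuelA conns) PySem.Set.empty [start]

-- ===== PORT B =====
-- def dfs(cur): group.add(cur); for c in reversed(conns[cur]): if elig: dfs(c)
-- (fuel only makes the recursion total; proved sufficient below)
def pvDfs (flows : List (String × String × Int)) (conns : List (String × List String)) :
    Nat → PySem.Set String → String → PySem.Set String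
  | 0, group, _ => group
  | f + 1, group, cur =>
    (pvConnsGet conns cur).reverse.foldl
      (fun g2 c => if pvElig flows g2 cur c then pvDfs flows conns f g2 c else g2)
      (PySem.Set.add group cur)

def extract_flow_group_alt (flows : List (String × String × Int)) (conns : List (String × List String)) (start : String) : List String :=
  pvDfs flows conns ((pvCV conns).length + 1) PySem.Set.empty start

-- ===== PRECONDITION & SPEC =====
-- Pre_ excludes inputs on which some dictionary lookup of the traversal can miss
-- (KeyError): it asks for a witness set R of conns keys containing start, closed under
-- positive-flow edges, whose nodes have a flows entry for every listed non-self
-- neighbor.  A can still return on a few excluded inputs, when the missing flows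
-- lookup happens to be skipped because its target was visited earlier (cited example).
def Pre_extract_flow_group (flows : List (String × String × Int)) (conns : List (String × List String)) (start : String) : Prop :=
  ∃ R ∈ (conns.map Prod.fst).sublists, start ∈ R ∧
    ∀ u ∈ R, ∀ c ∈ pvConnsGet conns u,
      (c = u ∨ ∃ t ∈ flows, t.1 = u ∧ t.2.1 = c) ∧ (0 < pvFlowsGet flows u c → c ∈ R)
instance (flows : List (String × String × Int)) (conns : List (String × List String)) (start : String) : Decidable (Pre_extract_flow_group flows conns start) := by unfold Pre_extract_flow_group; infer_instance

def pvWitness_extract_flow_group : (List (String × String × Int)) × (List (String × List String)) × String :=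
  ([("a", "b", (1 : Int)), ("b", "a", (0 : Int))], [("a", ["b"]), ("b", ["a"])], "a")

def Spec_extract_flow_group (flows : List (String × String × Int)) (conns : List (String × List String)) (start : String) (out : List String) : Prop := out = extract_flow_group_alt flows conns start
instance (flows : List (String × String × Int)) (conns : List (String × List String)) (start : String) (out : List String) : Decidable (Spec_extract_flow_group flows conns start out) := by unfold Spec_extract_flow_group; infer_instance

-- ===== CLAIM (what is proved, stated in full; the proofs are below) =====
def Claim_equal_extract_flow_group : Prop := ∀ (flows : List (String × String × Int)) (conns : List (String × List String)) (start : String), Dom_extract_flow_group flows conns start → Pre_extract_flow_group flows conns start → Spec_extract_flow_group flows conns start (extract_flow_group flows conns start)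

-- ===== LEMMAS AND PROOFS =====

-- canonical queue processing: pop the head; if unseen, run the full DFS from it
def pvRunQ (flows : List (String × String × Int)) (conns : List (String × List String)) :
    PySem.Set String → List String → PySem.Set String
  | g, [] => g
  | g, x :: xs =>
    pvRunQ flows conns
      (if PySem.Set.contains g x then g else pvDfs flows conns ((pvCV conns).length + 1) g x) xs

-- the invariant of A's reachable states: a queued node already in the group has
-- every eligible neighbor queued strictly ahead of it
def pvInv (flows : List (String × String × Int)) (conns : List (String × List String))
    (g : PySem.Set String) (q : List String) : Prop :=
  ∀ pre x post, q = pre ++ x :: post → x ∈ g →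
    ∀ c ∈ pvConnsGet conns x, c ∈ g ∨ pvFlowsGet flows x c ≤ 0 ∨ c ∈ pre

def pvF (conns : List (String × List String)) (g : PySem.Set String) (q : List String) : Nat :=
  ((q ++ pvCV conns).toFinset.filter (fun v => PySem.Set.contains g v = false)).card

def pvJ (g : PySem.Set String) (q : List String) : Nat :=
  match q with
  | [] => 1
  | x :: _ => if PySem.Set.contains g x then 1 else 0

def pvPsi (conns : List (String × List String)) (g : PySem.Set String) (q : List String) : Nat :=
  (2 * pvMaxDeg conns + 2) * pvF conns g q + q.length + pvMaxDeg conns * pvJ g q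

def pvPhi (conns : List (String × List String)) (g : PySem.Set String) : Nat :=
  ((pvCV conns).toFinset.filter (fun v => PySem.Set.contains g v = false)).card

theorem pvPush_fold {α : Type} (P : α → Bool) (cs q : List α) :
    cs.foldl (fun q c => if P c then c :: q else q) q = (cs.filter P).reverse ++ q := by
  induction cs generalizing q with
  | nil => simp
  | cons c cs ih =>
    simp only [List.foldl_cons, List.filter_cons]
    by_cases h : P c = true
    · simp [h, ih]
    · simp [h, ih]

theorem pvConnsGet_mem_CV (conns : List (String × List String)) (k c : String)
    (h : c ∈ pvConnsGet conns k) : c ∈ pvCV conns := by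
  induction conns with
  | nil => simp [pvConnsGet, PySem.Dict.getD, PySem.Dict.get?] at h
  | cons p rest ih =>
    simp only [pvConnsGet, PySem.Dict.getD, PySem.Dict.get?, List.find?] at h ih
    by_cases hk : (p.1 == k) = true
    · simp [hk] at h
      exact List.mem_flatMap.2 ⟨p, List.mem_cons_self .., h⟩
    · simp only [hk] at h
      have := ih h
      simp only [pvCV, List.flatMap_cons]
      exact List.mem_append_right _ (by simpa [pvCV] using this)

theorem pvConnsGet_len (conns : List (String × List String)) (k : String) :
    (pvConnsGet conns k).length ≤ pvMaxDeg conns := by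
  induction conns with
  | nil => simp [pvConnsGet, PySem.Dict.getD, PySem.Dict.get?]
  | cons p rest ih =>
    simp only [pvConnsGet, PySem.Dict.getD, PySem.Dict.get?, List.find?] at ih ⊢
    by_cases hk : (p.1 == k) = true
    all_goals
      have hmx : pvMaxDeg (p :: rest) = Nat.max p.2.length (pvMaxDeg rest) := by
        simp [pvMaxDeg]
      have hA : p.2.length ≤ pvMaxDeg (p :: rest) := by rw [hmx]; exact Nat.le_max_left _ _
      have hB : pvMaxDeg rest ≤ pvMaxDeg (p :: rest) := by rw [hmx]; exact Nat.le_max_right _ _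
    · simp only [hk, Option.map_some, Option.getD_some]
      exact hA
    · have hkf : (p.1 == k) = false := by simpa using hk
      simp only [hkf]
      exact le_trans ih hB

theorem pvElig_true_iff (flows : List (String × String × Int)) (g : PySem.Set String) (cur c : String) :
    pvElig flows g cur c = true ↔ c ∉ g ∧ 0 < pvFlowsGet flows cur c := by
  constructor
  · intro h
    rw [pvElig, Bool.and_eq_true, Bool.not_eq_true', decide_eq_true_iff] at h
    refine ⟨fun hm => ?_, h.2⟩
    rw [(PySem.Set.contains_iff g c).2 hm] at h
    exact absurd h.1 (by simp)
  · rintro ⟨h1, h2⟩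
    have hcf : PySem.Set.contains g c = false := by
      cases hcg : PySem.Set.contains g c
      · rfl
      · exact absurd ((PySem.Set.contains_iff g c).1 hcg) h1
    simp only [pvElig, hcf, Bool.not_false, Bool.true_and, decide_eq_true_iff]
    exact h2

theorem pvMemFalse (g : PySem.Set String) (v : String) :
    PySem.Set.contains g v = false ↔ v ∉ g := by
  constructor
  · intro h hm
    rw [(PySem.Set.contains_iff g v).2 hm] at h
    exact absurd h (by simp)
  · intro h
    cases hv : PySem.Set.contains g v
    · rfl
    · exact absurd ((PySem.Set.contains_iff g v).1 hv) h

theorem pvFold_mono (flows : List (String × String × Int)) (conns : List (String × List String))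
    (f : Nat) (hf : ∀ (g : PySem.Set String) (cur v : String), v ∈ g → v ∈ pvDfs flows conns f g cur) :
    ∀ (ds : List String) (cur : String) (g0 : PySem.Set String) (v : String), v ∈ g0 →
      v ∈ ds.foldl (fun g2 c => if pvElig flows g2 cur c then pvDfs flows conns f g2 c else g2) g0 := by
  intro ds cur
  induction ds with
  | nil => intro g0 v hv; simpa using hv
  | cons c cs ih =>
    intro g0 v hv
    simp only [List.foldl_cons]
    apply ih
    by_cases h : pvElig flows g0 cur c = true
    · simp only [h, if_true]; exact hf _ _ _ hv
    · simp only [h]; exact hv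

theorem pvDfs_mono (flows : List (String × String × Int)) (conns : List (String × List String)) :
    ∀ (f : Nat) (g : PySem.Set String) (cur v : String), v ∈ g → v ∈ pvDfs flows conns f g cur := by
  intro f
  induction f with
  | zero => intro g cur v hv; simpa [pvDfs] using hv
  | succ f ih =>
    intro g cur v hv
    simp only [pvDfs]
    exact pvFold_mono flows conns f ih _ cur _ v ((PySem.Set.mem_add _ _ _).2 (Or.inl hv))

theorem pvPhi_anti (conns : List (String × List String)) (g g' : PySem.Set String)
    (h : ∀ v, v ∈ g → v ∈ g') : pvPhi conns g' ≤ pvPhi conns g := by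
  apply Finset.card_le_card
  intro v hv
  rw [Finset.mem_filter] at hv ⊢
  refine ⟨hv.1, ?_⟩
  rw [pvMemFalse] at hv ⊢
  exact fun hm => hv.2 (h v hm)

theorem pvPhi_add_lt (conns : List (String × List String)) (g : PySem.Set String) (c : String)
    (hc : c ∈ pvCV conns) (hg : c ∉ g) : pvPhi conns (PySem.Set.add g c) < pvPhi conns g := by
  apply Finset.card_lt_card
  rw [Finset.ssubset_iff_of_subset]
  · refine ⟨c, ?_, ?_⟩
    · rw [Finset.mem_filter, pvMemFalse]
      exact ⟨List.mem_toFinset.2 hc, hg⟩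
    · rw [Finset.mem_filter, pvMemFalse]
      rintro ⟨-, hn⟩
      exact hn ((PySem.Set.mem_add g c c).2 (Or.inr rfl))
  · intro v hv
    rw [Finset.mem_filter, pvMemFalse] at hv ⊢
    exact ⟨hv.1, fun hm => hv.2 ((PySem.Set.mem_add g c v).2 (Or.inl hm))⟩

theorem pvPhi_le_len (conns : List (String × List String)) (g : PySem.Set String) :
    pvPhi conns g ≤ (pvCV conns).length := by
  exact le_trans (Finset.card_filter_le _ _) (List.toFinset_card_le _)

theorem pvFold_fuel (flows : List (String × String × Int)) (conns : List (String × List String)) :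
    ∀ (n : Nat) (ds : List String) (cur : String) (g : PySem.Set String) (f₁ f₂ : Nat),
      (∀ c ∈ ds, c ∈ pvCV conns) → pvPhi conns g ≤ n → n ≤ f₁ → n ≤ f₂ →
      ds.foldl (fun g2 c => if pvElig flows g2 cur c then pvDfs flows conns f₁ g2 c else g2) g =
      ds.foldl (fun g2 c => if pvElig flows g2 cur c then pvDfs flows conns f₂ g2 c else g2) g := by
  intro n
  induction n using Nat.strong_induction_on with
  | _ n IH =>
    intro ds cur
    induction ds with
    | nil => intro g f₁ f₂ _ _ _ _; rfl
    | cons c cs ihds =>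
      intro g f₁ f₂ hds hphi h1 h2
      simp only [List.foldl_cons]
      by_cases he : pvElig flows g cur c = true
      · have hcC : c ∈ pvCV conns := hds c (List.mem_cons_self ..)
        obtain ⟨hcg, hfl⟩ := (pvElig_true_iff flows g cur c).1 he
        have hpos : 1 ≤ pvPhi conns g := by
          apply Finset.card_pos.2
          exact ⟨c, by rw [Finset.mem_filter, pvMemFalse]; exact ⟨List.mem_toFinset.2 hcC, hcg⟩⟩
        have hdrop := pvPhi_add_lt conns g c hcC hcg
        obtain ⟨f₁', rfl⟩ : ∃ k, f₁ = k + 1 := ⟨f₁ - 1, by omega⟩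
        obtain ⟨f₂', rfl⟩ : ∃ k, f₂ = k + 1 := ⟨f₂ - 1, by omega⟩
        · have hd : pvDfs flows conns (f₁' + 1) g c = pvDfs flows conns (f₂' + 1) g c := by
            simp only [pvDfs]
            exact IH (n - 1) (by omega) _ c (PySem.Set.add g c) f₁' f₂'
              (fun x hx => pvConnsGet_mem_CV conns c x (List.mem_reverse.1 hx))
              (by omega) (by omega) (by omega)
          rw [if_pos he, if_pos he, hd]
          apply ihds _ (f₁' + 1) (f₂' + 1) (fun x hx => hds x (List.mem_cons_of_mem _ hx))
            (le_trans (pvPhi_anti conns g _ (fun v hv => pvDfs_mono flows conns _ g c v hv)) hphi) h1 h2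
      · rw [if_neg he, if_neg he]
        exact ihds _ f₁ f₂ (fun x hx => hds x (List.mem_cons_of_mem _ hx)) hphi h1 h2

theorem pvRunQ_append (flows : List (String × String × Int)) (conns : List (String × List String))
    (g : PySem.Set String) (q1 q2 : List String) :
    pvRunQ flows conns g (q1 ++ q2) = pvRunQ flows conns (pvRunQ flows conns g q1) q2 := by
  induction q1 generalizing g with
  | nil => simp [pvRunQ]
  | cons x xs ih => simp only [List.cons_append, pvRunQ]; exact ih _

theorem pvKey (flows : List (String × String × Int)) (conns : List (String × List String)) :
    ∀ (ds : List String) (g1 g' : PySem.Set String) (cur : String),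
      (∀ c ∈ ds, c ∈ pvCV conns) → (∀ v, v ∈ g1 → v ∈ g') →
      pvRunQ flows conns g' (ds.filter (fun c => pvElig flows g1 cur c)) =
      ds.foldl (fun g2 c => if pvElig flows g2 cur c then pvDfs flows conns ((pvCV conns).length) g2 c else g2) g' := by
  intro ds
  induction ds with
  | nil => intro g1 g' cur _ _; rfl
  | cons c cs ih =>
    intro g1 g' cur hds hle
    have hcC : c ∈ pvCV conns := hds c (List.mem_cons_self ..)
    have hds' : ∀ x ∈ cs, x ∈ pvCV conns := fun x hx => hds x (List.mem_cons_of_mem _ hx)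
    simp only [List.filter_cons, List.foldl_cons]
    by_cases h1e : pvElig flows g1 cur c = true
    · rw [if_pos h1e]
      obtain ⟨hc1, hfl⟩ := (pvElig_true_iff flows g1 cur c).1 h1e
      simp only [pvRunQ]
      by_cases hcg' : PySem.Set.contains g' c = true
      · have hef : pvElig flows g' cur c = false := by
          cases he : pvElig flows g' cur c
          · rfl
          · exact absurd ((PySem.Set.contains_iff g' c).1 hcg')
              ((pvElig_true_iff flows g' cur c).1 he).1
        rw [if_pos hcg', if_neg (by simp [hef])]
        exact ih g1 g' cur hds' hle
      · have hcf : PySem.Set.contains g' c = false := by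
          cases hx : PySem.Set.contains g' c
          · rfl
          · exact absurd hx hcg'
        have heg' : pvElig flows g' cur c = true :=
          (pvElig_true_iff flows g' cur c).2 ⟨(pvMemFalse g' c).1 hcf, hfl⟩
        rw [if_neg hcg', if_pos heg']
        have hne : pvCV conns ≠ [] := fun h => by rw [h] at hcC; exact absurd hcC (List.not_mem_nil)
        have hfuel : pvDfs flows conns ((pvCV conns).length + 1) g' c =
            pvDfs flows conns ((pvCV conns).length) g' c := by
          have hdrop := pvPhi_add_lt conns g' c hcC ((pvMemFalse g' c).1 hcf)
          have hlen := pvPhi_le_len conns g'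
          have hpos : 0 < (pvCV conns).length := List.length_pos_iff.2 hne
          obtain ⟨L', hL⟩ : ∃ k, (pvCV conns).length = k + 1 := ⟨(pvCV conns).length - 1, by omega⟩
          rw [hL]
          simp only [pvDfs]
          apply pvFold_fuel flows conns (pvPhi conns (PySem.Set.add g' c)) _ c _ (L' + 1) L'
            (fun x hx => pvConnsGet_mem_CV conns c x (List.mem_reverse.1 hx))
            (le_refl _) (by omega) (by omega)
        rw [hfuel]
        exact ih g1 _ cur hds' (fun v hv => pvDfs_mono flows conns _ g' c v (hle v hv))
    · rw [if_neg h1e]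
      have hef : pvElig flows g' cur c = false := by
        cases he : pvElig flows g' cur c
        · rfl
        · exfalso
          obtain ⟨hng', hfl⟩ := (pvElig_true_iff flows g' cur c).1 he
          exact h1e ((pvElig_true_iff flows g1 cur c).2 ⟨fun hm => hng' (hle _ hm), hfl⟩)
      rw [if_neg (by simp [hef])]
      exact ih g1 g' cur hds' hle

theorem pvF_mono_q (conns : List (String × List String)) (g : PySem.Set String)
    (q1 q2 : List String) (h : ∀ v ∈ q1, v ∈ q2 ∨ v ∈ pvCV conns) :
    pvF conns g q1 ≤ pvF conns g q2 := by
  apply Finset.card_le_card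
  intro v hv
  rw [Finset.mem_filter] at hv ⊢
  refine ⟨?_, hv.2⟩
  rw [List.mem_toFinset, List.mem_append] at hv ⊢
  rcases hv.1 with hq | hc
  · rcases h v hq with h' | h'
    · exact Or.inl h'
    · exact Or.inr h'
  · exact Or.inr hc

theorem pvF_prod_lt (conns : List (String × List String)) (g : PySem.Set String)
    (cur : String) (rest fr : List String) (hcur : cur ∉ g)
    (hfr : ∀ v ∈ fr, v ∈ pvCV conns) :
    pvF conns (PySem.Set.add g cur) (fr ++ rest) < pvF conns g (cur :: rest) := by
  apply Finset.card_lt_card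
  rw [Finset.ssubset_iff_of_subset]
  · refine ⟨cur, ?_, ?_⟩
    · rw [Finset.mem_filter, pvMemFalse]
      exact ⟨List.mem_toFinset.2 (List.mem_append_left _ (List.mem_cons_self ..)), hcur⟩
    · rw [Finset.mem_filter, pvMemFalse]
      rintro ⟨-, hn⟩
      exact hn ((PySem.Set.mem_add g cur cur).2 (Or.inr rfl))
  · intro v hv
    rw [Finset.mem_filter, pvMemFalse] at hv ⊢
    refine ⟨?_, fun hm => hv.2 ((PySem.Set.mem_add g cur v).2 (Or.inl hm))⟩
    rw [List.mem_toFinset, List.mem_append] at hv ⊢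
    rcases hv.1 with hq | hc
    · rcases List.mem_append.1 hq with hf | hr
      · exact Or.inr (hfr v hf)
      · exact Or.inl (List.mem_cons_of_mem _ hr)
    · exact Or.inr hc

theorem pvInv_tail (flows : List (String × String × Int)) (conns : List (String × List String))
    (g : PySem.Set String) (cur : String) (rest : List String)
    (hinv : pvInv flows conns g (cur :: rest)) (hcur : cur ∈ g) :
    pvInv flows conns g rest := by
  intro pre x post hsplit hx c hcm
  have h := hinv (cur :: pre) x post (by rw [List.cons_append, hsplit]) hx c hcm
  rcases h with h | h | h
  · exact Or.inl h
  · exact Or.inr (Or.inl h)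
  · rcases List.mem_cons.1 h with h' | h'
    · exact Or.inl (h' ▸ hcur)
    · exact Or.inr (Or.inr h')

theorem pvInv_step (flows : List (String × String × Int)) (conns : List (String × List String))
    (g : PySem.Set String) (cur : String) (rest : List String)
    (hinv : pvInv flows conns g (cur :: rest)) (hcur : cur ∉ g) :
    pvInv flows conns (PySem.Set.add g cur)
      (((pvConnsGet conns cur).filter
          (fun c => pvElig flows (PySem.Set.add g cur) cur c)).reverse ++ rest) := by
  set g1 := PySem.Set.add g cur with hg1
  set fr := ((pvConnsGet conns cur).filter (fun c => pvElig flows g1 cur c)).reverse with hfr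
  have hfrNotG1 : ∀ v ∈ fr, v ∉ g1 := by
    intro v hv
    have := List.mem_filter.1 (List.mem_reverse.1 hv)
    exact ((pvElig_true_iff flows g1 cur v).1 this.2).1
  intro pre x post hsplit hx c hcm
  -- locate x: inside fr (impossible) or inside rest
  have hcase : (∃ k, pre = fr ++ k ∧ rest = k ++ x :: post) ∨ x ∈ fr := by
    rcases List.append_eq_append_iff.1 hsplit with ⟨a', ha1, ha2⟩ | ⟨c', hc1, hc2⟩
    · exact Or.inl ⟨a', ha1, ha2⟩
    · match c', hc2 with
      | [], hc2 => exact Or.inl ⟨[], by simpa using hc1.symm, by simpa using hc2.symm⟩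
      | y :: t, hc2 =>
        refine Or.inr ?_
        have hxy : y = x := by
          have := congrArg (fun l => l.head?) hc2
          simpa using this.symm
        rw [hc1]
        exact List.mem_append_right _ (hxy ▸ List.mem_cons_self ..)
  rcases hcase with ⟨k, hpre, hrest⟩ | hxfr
  · rcases (PySem.Set.mem_add g cur x).1 hx with hxg | hxcur
    · -- x was already in g: use the old invariant one level deeper
      have h := hinv (cur :: k) x post (by rw [hrest]; rfl) hxg c hcm
      rcases h with h | h | h
      · exact Or.inl ((PySem.Set.mem_add g cur c).2 (Or.inl h))
      · exact Or.inr (Or.inl h)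
      · rcases List.mem_cons.1 h with h' | h'
        · exact Or.inl (h' ▸ (PySem.Set.mem_add g cur cur).2 (Or.inr rfl))
        · exact Or.inr (Or.inr (by rw [hpre]; exact List.mem_append_right _ h'))
    · -- x = cur: its eligible neighbors are exactly the freshly pushed ones
      subst hxcur
      by_cases he : pvElig flows g1 x c = true
      · refine Or.inr (Or.inr ?_)
        rw [hpre]
        exact List.mem_append_left _ (List.mem_reverse.2 (List.mem_filter.2 ⟨hcm, he⟩))
      · by_cases hcg1 : c ∈ g1
        · exact Or.inl hcg1
        · refine Or.inr (Or.inl ?_)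
          by_contra hfl
          exact he ((pvElig_true_iff flows g1 x c).2 ⟨hcg1, by omega⟩)
  · exact absurd hx (by
      have : x ∈ fr := hxfr
      exact fun hxg1 => (hfrNotG1 x this) hxg1)

theorem pvJ_le_one (g : PySem.Set String) (q : List String) : pvJ g q ≤ 1 := by
  match q with
  | [] => exact le_refl _
  | x :: _ =>
    simp only [pvJ]
    split <;> omega

theorem pvMain (flows : List (String × String × Int)) (conns : List (String × List String)) :
    ∀ (f : Nat) (g : PySem.Set String) (q : List String),
      pvPsi conns g q < f → pvInv flows conns g q →
      pvLoopA flows conns f g q = pvRunQ flows conns g q := by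
  intro f
  induction f with
  | zero => intro g q h _; exact absurd h (by omega)
  | succ f ih =>
    intro g q hpsi hinv
    match q with
    | [] => rfl
    | cur :: rest =>
      simp only [pvLoopA]
      rw [pvPush_fold]
      have hKdef : 2 * pvMaxDeg conns + 2 = 2 * pvMaxDeg conns + 2 := rfl
      have hpD : ((pvConnsGet conns cur).filter
          (fun c => pvElig flows (PySem.Set.add g cur) cur c)).length ≤ pvMaxDeg conns :=
        le_trans (List.length_filter_le _ _) (pvConnsGet_len conns cur)
      by_cases hc : PySem.Set.contains g cur = true
      · -- stale pop: the invariant forbids any push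
        have hcurg : cur ∈ g := (PySem.Set.contains_iff g cur).1 hc
        have hg1g : PySem.Set.add g cur = g := PySem.Set.add_of_mem hcurg
        have hfilt : (pvConnsGet conns cur).filter
            (fun c => pvElig flows (PySem.Set.add g cur) cur c) = [] := by
          rw [List.filter_eq_nil_iff]
          intro c hcm he
          have hi := hinv [] cur rest (by simp) hcurg c hcm
          obtain ⟨hng, hfl⟩ := (pvElig_true_iff flows _ cur c).1 he
          rw [hg1g] at hng
          rcases hi with h | h | h
          · exact hng h
          · omega
          · exact absurd h (List.not_mem_nil)
        rw [hfilt, hg1g]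
        simp only [List.reverse_nil, List.nil_append]
        have hF : pvF conns g rest ≤ pvF conns g (cur :: rest) :=
          pvF_mono_q conns g rest (cur :: rest) (fun v hv => Or.inl (List.mem_cons_of_mem _ hv))
        have hpsi' : pvPsi conns g rest < f := by
          have hJ := pvJ_le_one g rest
          have hJq : pvJ g (cur :: rest) = 1 := by simp only [pvJ]; rw [if_pos hc]
          have hmul := Nat.mul_le_mul_left (2 * pvMaxDeg conns + 2) hF
          have hmulJ := Nat.mul_le_mul_left (pvMaxDeg conns) hJ
          unfold pvPsi at hpsi ⊢
          rw [hJq] at hpsi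
          simp only [List.length_cons] at hpsi
          omega
        rw [ih g rest hpsi' (pvInv_tail flows conns g cur rest hinv hcurg)]
        simp only [pvRunQ, hc, if_true]
      · -- productive pop
        have hcf : PySem.Set.contains g cur = false := by
          cases hx : PySem.Set.contains g cur
          · rfl
          · exact absurd hx hc
        have hcurng : cur ∉ g := (pvMemFalse g cur).1 hcf
        set g1 := PySem.Set.add g cur with hg1
        set fr := ((pvConnsGet conns cur).filter (fun c => pvElig flows g1 cur c)).reverse with hfrdef
        have hfrCV : ∀ v ∈ fr, v ∈ pvCV conns := by
          intro v hv
          exact pvConnsGet_mem_CV conns cur v (List.mem_of_mem_filter (List.mem_reverse.1 hv))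
        have hF : pvF conns g1 (fr ++ rest) < pvF conns g (cur :: rest) :=
          pvF_prod_lt conns g cur rest fr hcurng hfrCV
        have hpsi' : pvPsi conns g1 (fr ++ rest) < f := by
          have hJ := pvJ_le_one g1 (fr ++ rest)
          have hJq : pvJ g (cur :: rest) = 0 := by simp only [pvJ]; rw [if_neg hc]
          have hlenfr : fr.length ≤ pvMaxDeg conns := by
            rw [hfrdef, List.length_reverse]; exact hpD
          have hmul := Nat.mul_le_mul_left (2 * pvMaxDeg conns + 2) (Nat.succ_le_of_lt hF)
          have hmulJ := Nat.mul_le_mul_left (pvMaxDeg conns) hJ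
          unfold pvPsi at hpsi ⊢
          rw [hJq] at hpsi
          simp only [List.length_cons, List.length_append] at hpsi ⊢
          rw [Nat.mul_succ] at hmul
          omega
        rw [ih g1 (fr ++ rest) hpsi' (pvInv_step flows conns g cur rest hinv hcurng)]
        rw [pvRunQ_append]
        have hkey : pvRunQ flows conns g1 fr = pvDfs flows conns ((pvCV conns).length + 1) g cur := by
          have hrev : fr = ((pvConnsGet conns cur).reverse).filter
              (fun c => pvElig flows g1 cur c) := by
            rw [hfrdef, List.filter_reverse]
          rw [hrev]
          rw [pvKey flows conns ((pvConnsGet conns cur).reverse) g1 g1 cur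
            (fun c hcm => pvConnsGet_mem_CV conns cur c (List.mem_reverse.1 hcm))
            (fun v hv => hv)]
          simp only [pvDfs]
          rw [← hg1]
        rw [hkey]
        simp only [pvRunQ, hcf]
        rfl

-- ===== VERDICT (by name: the statement is the Claim_ definition above) =====
theorem extract_flow_group_spec : Claim_equal_extract_flow_group := by
  intro flows conns start _ _
  unfold Spec_extract_flow_group extract_flow_group extract_flow_group_alt
  have hinv0 : pvInv flows conns PySem.Set.empty [start] := by
    intro pre x post _ hx
    exact absurd hx (by simp [PySem.Set.empty])
  have hpsi : pvPsi conns PySem.Set.empty [start] < pvFuelA conns := by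
    have hF : pvF conns PySem.Set.empty [start] ≤ (pvCV conns).length + 1 := by
      refine le_trans (Finset.card_filter_le _ _) ?_
      refine le_trans (List.toFinset_card_le _) ?_
      simp
    have hJ := pvJ_le_one PySem.Set.empty [start]
    have hmul := Nat.mul_le_mul_left (2 * pvMaxDeg conns + 2) hF
    have hsplit : (2 * pvMaxDeg conns + 2) * ((pvCV conns).length + 2) =
        (2 * pvMaxDeg conns + 2) * ((pvCV conns).length + 1) + (2 * pvMaxDeg conns + 2) := by
      ring
    have hmulJ := Nat.mul_le_mul_left (pvMaxDeg conns) hJ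
    unfold pvPsi pvFuelA
    simp only [List.length_cons, List.length_nil]
    omega
  rw [pvMain flows conns (pvFuelA conns) PySem.Set.empty [start] hpsi hinv0]
  rfl
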